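-- pv_equiv track=rewrite | github.com/homo-sapiens94/Bites_of_py | 29/wrong_char.py | get_index_different_char
-- ===== SOURCE A (Python) =====
-- def get_index_different_char(chars):
--     a=str(chars[0])
--     if a.isalnum():
--         for i in range(1,len(chars)):
--             if not str(chars[i]).isalnum():
--                 return i
--     else:
--         for i in range(1,len(chars)):
--             if str(chars[i]).isalnum():
--                 return i
-- ===== SOURCE B (Python) =====
-- def get_index_different_char(chars):
--     # The elements before the first differing one all share chars[0]'s alnum flag,
--     # so the answer is 1 + the first position where two ADJACENT flags differ.
--     flags = [str(c).isalnum() for c in chars]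
--     for i, (p, q) in enumerate(zip(flags, flags[1:])):
--         if p != q:
--             return i + 1
--     return None
-- ===== Notes on version B (the rewrite author's own statement) =====
-- stated objective: alternative
-- what changed: B builds a flag table and scans ADJACENT flag pairs via zip (correct because the prefix before the first change is constant), instead of A's two symmetric loops comparing every element against the first element's flag.
import Mathlib
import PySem

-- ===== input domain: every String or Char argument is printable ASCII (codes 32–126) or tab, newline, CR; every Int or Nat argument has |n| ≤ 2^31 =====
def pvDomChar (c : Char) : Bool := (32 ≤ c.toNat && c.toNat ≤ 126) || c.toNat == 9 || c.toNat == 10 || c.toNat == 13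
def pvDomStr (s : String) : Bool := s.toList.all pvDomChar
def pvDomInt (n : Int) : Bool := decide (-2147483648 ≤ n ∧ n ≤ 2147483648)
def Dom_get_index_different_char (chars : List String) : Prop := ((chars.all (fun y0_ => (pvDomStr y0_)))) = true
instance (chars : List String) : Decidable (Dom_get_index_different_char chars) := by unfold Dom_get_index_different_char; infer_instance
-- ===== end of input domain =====

-- B scans adjacent pairs of a precomputed alnum-flag table (zip) instead of A's two loops comparing each element to the first; alternative algorithm, same cost.


-- ===== PORT A =====
-- first loop: scan indices for the first NON-alnum element
def pvLoopNonAlnum (chars : List String) : List Int → Option Int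
  | [] => none
  | i :: rest =>
    if !(PySem.Str.strIsalnum (PySem.List.pyGetD chars i "")) then some i
    else pvLoopNonAlnum chars rest

-- second loop: scan indices for the first alnum element
def pvLoopAlnum (chars : List String) : List Int → Option Int
  | [] => none
  | i :: rest =>
    if PySem.Str.strIsalnum (PySem.List.pyGetD chars i "") then some i
    else pvLoopAlnum chars rest

def get_index_different_char (chars : List String) : Option Int :=
  let a := PySem.List.pyGetD chars 0 ""      -- chars[0]; Pre_ guarantees chars ≠ []
  if PySem.Str.strIsalnum a then
    pvLoopNonAlnum chars (PySem.List.pyRange 1 (PySem.List.len chars) 1)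
  else
    pvLoopAlnum chars (PySem.List.pyRange 1 (PySem.List.len chars) 1)

-- ===== PORT B =====
-- 'for i, (p, q) in enumerate(zip(flags, flags[1:])): if p != q: return i + 1'
def pvAdjLoop : List (Bool × Bool) → Int → Option Int
  | [], _ => none
  | (p, q) :: rest, i => if p != q then some (i + 1) else pvAdjLoop rest (i + 1)

def get_index_different_char_alt (chars : List String) : Option Int :=
  let flags := chars.map (fun c => PySem.Str.strIsalnum c)
  pvAdjLoop (List.zip flags (flags.drop 1)) 0

-- ===== PRECONDITION & SPEC =====
-- A raises IndexError on the empty list (chars[0])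
def Pre_get_index_different_char (chars : List String) : Prop := chars ≠ []
instance (chars : List String) : Decidable (Pre_get_index_different_char chars) := by unfold Pre_get_index_different_char; infer_instance
def pvWitness_get_index_different_char : List String := (["a", "!", "b"])

def Spec_get_index_different_char (chars : List String) (out : Option Int) : Prop := out = get_index_different_char_alt chars
instance (chars : List String) (out : Option Int) : Decidable (Spec_get_index_different_char chars out) := by unfold Spec_get_index_different_char; infer_instance

-- ===== CLAIM (what is proved, stated in full; the proofs are below) =====
def Claim_equal_get_index_different_char : Prop := ∀ (chars : List String), Dom_get_index_different_char chars → Pre_get_index_different_char chars → Spec_get_index_different_char chars (get_index_different_char chars)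

-- ===== LEMMAS AND PROOFS =====

theorem pvLoopNonAlnum_eq (chars : List String) (i : Nat) (h : i ≤ chars.length) :
    pvLoopNonAlnum chars (PySem.List.pyRange (i : Int) (chars.length : Int) 1) =
      (PySem.List.index? ((chars.drop i).map PySem.Str.strIsalnum) false).map
        (fun k => ((i + k : Nat) : Int)) := by
  induction hn : chars.length - i generalizing i with
  | zero =>
    have hi : i = chars.length := by omega
    subst hi
    rw [PySem.List.pyRange_one_eq_nil (by omega)]
    simp [pvLoopNonAlnum, PySem.List.index?]
  | succ n ih =>
    have hlt : i < chars.length := by omega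
    rw [PySem.List.pyRange_one_cons (by exact_mod_cast hlt)]
    have hdrop : chars.drop i = chars[i] :: chars.drop (i + 1) :=
      List.drop_eq_getElem_cons hlt
    have hget : PySem.List.pyGetD chars (i : Int) "" = chars[i] := by
      rw [PySem.List.pyGetD_eq_getElem] <;> simp [hlt]
    rw [pvLoopNonAlnum, hget, hdrop]
    by_cases hb : PySem.Str.strIsalnum chars[i] = false
    · simp only [List.map_cons, hb]
      rw [PySem.List.index?_cons_self]
      simp
    · simp only [Bool.not_eq_false] at hb
      simp only [List.map_cons, hb]
      rw [PySem.List.index?_cons_of_ne _ (by simp)]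
      simp only [Bool.not_true, Bool.false_eq_true, if_false]
      have := ih (i + 1) (by omega) (by omega)
      rw [show ((i : Int) + 1) = ((i + 1 : Nat) : Int) by push_cast; ring, this]
      cases PySem.List.index? ((chars.drop (i + 1)).map PySem.Str.strIsalnum) false with
      | none => simp
      | some k => simp; ring

theorem pvLoopAlnum_eq (chars : List String) (i : Nat) (h : i ≤ chars.length) :
    pvLoopAlnum chars (PySem.List.pyRange (i : Int) (chars.length : Int) 1) =
      (PySem.List.index? ((chars.drop i).map PySem.Str.strIsalnum) true).map
        (fun k => ((i + k : Nat) : Int)) := by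
  induction hn : chars.length - i generalizing i with
  | zero =>
    have hi : i = chars.length := by omega
    subst hi
    rw [PySem.List.pyRange_one_eq_nil (by omega)]
    simp [pvLoopAlnum, PySem.List.index?]
  | succ n ih =>
    have hlt : i < chars.length := by omega
    rw [PySem.List.pyRange_one_cons (by exact_mod_cast hlt)]
    have hdrop : chars.drop i = chars[i] :: chars.drop (i + 1) :=
      List.drop_eq_getElem_cons hlt
    have hget : PySem.List.pyGetD chars (i : Int) "" = chars[i] := by
      rw [PySem.List.pyGetD_eq_getElem] <;> simp [hlt]
    rw [pvLoopAlnum, hget, hdrop]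
    by_cases hb : PySem.Str.strIsalnum chars[i] = true
    · simp only [List.map_cons, hb]
      rw [PySem.List.index?_cons_self]
      simp
    · simp only [Bool.not_eq_true] at hb
      simp only [List.map_cons, hb]
      rw [PySem.List.index?_cons_of_ne _ (by simp)]
      simp only [Bool.false_eq_true, if_false]
      have := ih (i + 1) (by omega) (by omega)
      rw [show ((i : Int) + 1) = ((i + 1 : Nat) : Int) by push_cast; ring, this]
      cases PySem.List.index? ((chars.drop (i + 1)).map PySem.Str.strIsalnum) true with
      | none => simp
      | some k => simp; ring

-- adjacent-change scan on f0 :: fs finds exactly the first element of fs differing from f0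
theorem pvAdjLoop_eq (f0 : Bool) (fs : List Bool) (i : Int) :
    pvAdjLoop (List.zip (f0 :: fs) fs) i =
      (PySem.List.index? fs (!f0)).map (fun k => i + 1 + (k : Int)) := by
  induction fs generalizing f0 i with
  | nil => simp [pvAdjLoop, PySem.List.index?]
  | cons f fs' ih =>
    have hz : List.zip (f0 :: f :: fs') (f :: fs') = (f0, f) :: List.zip (f :: fs') fs' := rfl
    rw [hz, pvAdjLoop]
    by_cases hb : f0 = f
    · subst hb
      simp only [bne_self_eq_false, Bool.false_eq_true, if_false]
      rw [ih f0 (i + 1),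
        PySem.List.index?_cons_of_ne _ (by simp)]
      cases PySem.List.index? fs' (!f0) with
      | none => simp
      | some k => simp; ring
    · have hf : f = !f0 := by cases f0 <;> cases f <;> simp_all
      subst hf
      have ht : (f0 != !f0) = true := by cases f0 <;> rfl
      simp only [ht, if_true]
      rw [PySem.List.index?_cons_self]
      simp

-- ===== VERDICT (by name: the statement is the Claim_ definition above) =====
theorem get_index_different_char_spec : Claim_equal_get_index_different_char := by
  intro chars _ hpre
  unfold Spec_get_index_different_char get_index_different_char get_index_different_char_alt
  obtain ⟨a, rest, rfl⟩ : ∃ a rest, chars = a :: rest := by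
    cases chars with
    | nil => exact absurd rfl hpre
    | cons a rest => exact ⟨a, rest, rfl⟩
  have hget0 : PySem.List.pyGetD (a :: rest) (0 : Int) "" = a := by
    rw [PySem.List.pyGetD_eq_getElem] <;> simp
  have hlen : PySem.List.len (a :: rest) = ((a :: rest).length : Int) := by
    simp [PySem.List.len]
  have hA := pvLoopNonAlnum_eq (a :: rest) 1 (by simp)
  have hB := pvLoopAlnum_eq (a :: rest) 1 (by simp)
  simp only [List.drop_one, List.tail_cons, Nat.cast_one] at hA hB
  have hAdj := pvAdjLoop_eq (PySem.Str.strIsalnum a) (rest.map PySem.Str.strIsalnum) 0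
  simp only [List.map_cons, List.drop_succ_cons, List.drop_zero] at hAdj ⊢
  rw [hAdj, hget0]
  by_cases hb : PySem.Str.strIsalnum a = true
  · rw [hb]
    simp only [hlen, hA, Bool.not_true]
    cases PySem.List.index? (rest.map PySem.Str.strIsalnum) false with
    | none => simp
    | some k => simp <;> ring
  · simp only [Bool.not_eq_true] at hb
    rw [hb]
    simp only [Bool.false_eq_true, if_false, hlen, hB, Bool.not_false]
    cases PySem.List.index? (rest.map PySem.Str.strIsalnum) true with
    | none => simp
    | some k => simp <;> ring
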